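-- pv_equiv track=rewrite | github.com/amalieeh/advent-of-code | 2024/day2/day2.py | areReportSafe
-- ===== SOURCE A (Python) =====
-- def isInRange(num):
--     return num >= 1 and num <= 3
--
-- def areReportSafe(list):
--   isIncreasing = False
--   isDecreasing = False
--   for j in range(len(list)-1):
--       diff = list[j] - list[j+1]
--       if diff < 0:
--           isIncreasing = True
--       elif diff > 0:
--           isDecreasing = True
--       if isIncreasing == isDecreasing:
--           return "Unsafe"
--       if not isInRange(abs(diff)):
--           return "Unsafe"
--   return "Safe"
-- ===== SOURCE B (Python) =====
-- def areReportSafe(list):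
--     diffs = [list[j] - list[j + 1] for j in range(len(list) - 1)]
--     if all(1 <= d <= 3 for d in diffs) or all(-3 <= d <= -1 for d in diffs):
--         return "Safe"
--     return "Unsafe"
-- ===== Notes on version B (the rewrite author's own statement) =====
-- stated objective: simpler
-- what changed: Replaced the stateful loop with two direction flags and early returns by building the list of consecutive differences once and returning Safe iff all of them fall in the positive band 1..3 or all fall in the negative band -3..-1.
import Mathlib
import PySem

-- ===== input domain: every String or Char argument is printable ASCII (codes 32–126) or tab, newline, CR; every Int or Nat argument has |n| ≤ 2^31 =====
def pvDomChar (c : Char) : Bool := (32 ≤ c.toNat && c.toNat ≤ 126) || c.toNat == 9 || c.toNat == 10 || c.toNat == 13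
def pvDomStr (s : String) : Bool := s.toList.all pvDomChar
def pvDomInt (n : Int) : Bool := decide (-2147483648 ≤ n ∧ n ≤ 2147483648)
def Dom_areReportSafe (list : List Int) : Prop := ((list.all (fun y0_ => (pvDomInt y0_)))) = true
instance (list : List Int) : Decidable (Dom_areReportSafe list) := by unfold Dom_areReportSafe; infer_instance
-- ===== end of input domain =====

-- B replaces A's two persistent direction flags and per-step early returns by whole-sequence
-- band tests on the list of consecutive differences (objective: simpler).

-- ===== PORT A =====
def isInRange (num : Int) : Bool := num ≥ 1 && num ≤ 3

-- the for-loop over range(len(list)-1) with early returns, as structural recursion on j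
def areReportSafeLoop (list : List Int) (n j : Nat) (isIncreasing isDecreasing : Bool) : String :=
  if h : j < n then
    let diff := PySem.List.pyGetD list (Int.ofNat j) 0 - PySem.List.pyGetD list (Int.ofNat (j+1)) 0
    let isIncreasing := if diff < 0 then true else isIncreasing
    let isDecreasing := if ¬ (diff < 0) ∧ diff > 0 then true else isDecreasing
    if isIncreasing == isDecreasing then "Unsafe"
    else if ¬ (isInRange |diff| = true) then "Unsafe"
    else areReportSafeLoop list n (j+1) isIncreasing isDecreasing
  else "Safe"
termination_by n - j

def areReportSafe (list : List Int) : String :=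
  areReportSafeLoop list (list.length - 1) 0 false false

-- ===== PORT B =====
def areReportSafe_alt (list : List Int) : String :=
  let diffs := (List.range (list.length - 1)).map
    (fun j => PySem.List.pyGetD list (Int.ofNat j) 0 - PySem.List.pyGetD list (Int.ofNat (j+1)) 0)
  if diffs.all (fun d => decide (1 ≤ d ∧ d ≤ 3)) || diffs.all (fun d => decide (-3 ≤ d ∧ d ≤ -1))
  then "Safe" else "Unsafe"

-- ===== PRECONDITION & SPEC =====
def Spec_areReportSafe (list : List Int) (out : String) : Prop := out = areReportSafe_alt list
instance (list : List Int) (out : String) : Decidable (Spec_areReportSafe list out) := by unfold Spec_areReportSafe; infer_instance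

-- ===== CLAIM (what is proved, stated in full; the proofs are below) =====
def Claim_equal_areReportSafe : Prop := ∀ (list : List Int), Dom_areReportSafe list → Spec_areReportSafe list (areReportSafe list)

-- ===== LEMMAS AND PROOFS =====

-- the j-th consecutive difference
def pvDiff (list : List Int) (j : Nat) : Int :=
  PySem.List.pyGetD list (Int.ofNat j) 0 - PySem.List.pyGetD list (Int.ofNat (j+1)) 0

def bandPos (d : Int) : Bool := decide (1 ≤ d ∧ d ≤ 3)
def bandNeg (d : Int) : Bool := decide (-3 ≤ d ∧ d ≤ -1)

-- one unfolding of the loop when the guard holds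
theorem loop_step (list : List Int) (n j : Nat) (inc dec : Bool) (h : j < n) :
    areReportSafeLoop list n j inc dec =
      (let d := pvDiff list j
       let inc' := if d < 0 then true else inc
       let dec' := if ¬ (d < 0) ∧ d > 0 then true else dec
       if inc' == dec' then "Unsafe"
       else if ¬ (isInRange |d| = true) then "Unsafe"
       else areReportSafeLoop list n (j+1) inc' dec') := by
  rw [areReportSafeLoop]
  simp only [h, dif_pos, pvDiff]
  rfl

-- loop from state (true,false): Safe iff every remaining diff is in [-3,-1]
theorem loop_inc (list : List Int) (n : Nat) : ∀ (m j : Nat), n = j + m →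
    areReportSafeLoop list n j true false =
      (if ((List.range' j m).map (pvDiff list)).all bandNeg then "Safe" else "Unsafe") := by
  intro m
  induction m with
  | zero => intro j hn; subst hn; rw [areReportSafeLoop]; simp
  | succ m ih =>
    intro j hn
    rw [loop_step list n j true false (by omega), List.range'_succ]
    simp only [List.map_cons, List.all_cons]
    by_cases h0 : pvDiff list j < 0
    · by_cases hr : -3 ≤ pvDiff list j ∧ pvDiff list j ≤ -1
      · have hir : isInRange |pvDiff list j| = true := by unfold isInRange; simp [abs_of_neg h0]; omega
        have hb : bandNeg (pvDiff list j) = true := by unfold bandNeg; exact decide_eq_true hr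
        simp [h0, hir, ih (j+1) (by omega)]
        simp only [hb, Bool.true_and]
      · have hir : ¬ (isInRange |pvDiff list j| = true) := by unfold isInRange; simp [abs_of_neg h0]; omega
        simp [h0, hir, bandNeg, hr]
    · by_cases h1 : pvDiff list j > 0
      · simp [h0, h1, bandNeg]; omega
      · have hz : pvDiff list j = 0 := by omega
        simp [bandNeg, isInRange, hz]

-- loop from state (false,true): Safe iff every remaining diff is in [1,3]
theorem loop_dec (list : List Int) (n : Nat) : ∀ (m j : Nat), n = j + m →
    areReportSafeLoop list n j false true =
      (if ((List.range' j m).map (pvDiff list)).all bandPos then "Safe" else "Unsafe") := by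
  intro m
  induction m with
  | zero => intro j hn; subst hn; rw [areReportSafeLoop]; simp
  | succ m ih =>
    intro j hn
    rw [loop_step list n j false true (by omega), List.range'_succ]
    simp only [List.map_cons, List.all_cons]
    by_cases h0 : pvDiff list j < 0
    · simp [h0, bandPos]; omega
    · by_cases h1 : pvDiff list j > 0
      · by_cases hr : 1 ≤ pvDiff list j ∧ pvDiff list j ≤ 3
        · have hir : isInRange |pvDiff list j| = true := by unfold isInRange; simp [abs_of_pos h1]; omega
          have hb : bandPos (pvDiff list j) = true := by unfold bandPos; exact decide_eq_true hr
          simp [h0, h1, hir, ih (j+1) (by omega)]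
          simp only [hb, Bool.true_and]
        · have hir : ¬ (isInRange |pvDiff list j| = true) := by unfold isInRange; simp [abs_of_pos h1]; omega
          simp [h0, h1, hir, bandPos, hr]
      · have hz : pvDiff list j = 0 := by omega
        simp [bandPos, isInRange, hz]

-- loop from the start state (false,false)
theorem loop_start (list : List Int) (n : Nat) :
    areReportSafeLoop list n 0 false false =
      (if ((List.range' 0 n).map (pvDiff list)).all bandPos
          || ((List.range' 0 n).map (pvDiff list)).all bandNeg then "Safe" else "Unsafe") := by
  cases n with
  | zero => rw [areReportSafeLoop]; simp
  | succ m =>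
    rw [loop_step list (m+1) 0 false false (by omega), List.range'_succ]
    simp only [List.map_cons, List.all_cons]
    by_cases h0 : pvDiff list 0 < 0
    · by_cases hr : -3 ≤ pvDiff list 0 ∧ pvDiff list 0 ≤ -1
      · have hir : isInRange |pvDiff list 0| = true := by unfold isInRange; simp [abs_of_neg h0]; omega
        have hp : bandPos (pvDiff list 0) = false := by unfold bandPos; simp; omega
        have hb : bandNeg (pvDiff list 0) = true := by unfold bandNeg; exact decide_eq_true hr
        simp [h0, hir, loop_inc list (m+1) m 1 (by omega), hp]
        simp only [hb]
        simp
      · have hir : ¬ (isInRange |pvDiff list 0| = true) := by unfold isInRange; simp [abs_of_neg h0]; omega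
        have hp : bandPos (pvDiff list 0) = false := by unfold bandPos; simp; omega
        have hq : bandNeg (pvDiff list 0) = false := by unfold bandNeg; simp; omega
        simp [h0, hir, hp, hq]
    · by_cases h1 : pvDiff list 0 > 0
      · by_cases hr : 1 ≤ pvDiff list 0 ∧ pvDiff list 0 ≤ 3
        · have hir : isInRange |pvDiff list 0| = true := by unfold isInRange; simp [abs_of_pos h1]; omega
          have hq : bandNeg (pvDiff list 0) = false := by unfold bandNeg; simp; omega
          have hb : bandPos (pvDiff list 0) = true := by unfold bandPos; exact decide_eq_true hr
          simp [h0, h1, hir, loop_dec list (m+1) m 1 (by omega), hq]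
          simp only [hb]
          simp
        · have hir : ¬ (isInRange |pvDiff list 0| = true) := by unfold isInRange; simp [abs_of_pos h1]; omega
          have hp : bandPos (pvDiff list 0) = false := by unfold bandPos; simp; omega
          have hq : bandNeg (pvDiff list 0) = false := by unfold bandNeg; simp; omega
          simp [h0, h1, hir, hp, hq]
      · have hz : pvDiff list 0 = 0 := by omega
        simp [bandPos, bandNeg, hz]

-- ===== VERDICT (by name: the statement is the Claim_ definition above) =====
theorem areReportSafe_spec : Claim_equal_areReportSafe := by
  intro list _
  unfold Spec_areReportSafe areReportSafe areReportSafe_alt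
  rw [loop_start list (list.length - 1)]
  simp [List.range_eq_range', pvDiff, bandPos, bandNeg]
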